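-- pv_equiv track=rewrite | github.com/tonyyo/- | Python算法指南/268_合并账户_此题只能解决部分特例.py | NoRepeat
-- ===== SOURCE A (Python) =====
-- def NoRepeat(queue):
--     rowNum = len(queue)
--     for i in range(rowNum):
--         for j in range(i + 1, rowNum):
--             if queue[i][0] == queue[j][0]:
--                 tempList1 = queue[i][1:]
--                 tempList2 = queue[j][1:]
--                 if set(tempList1) & set(tempList2):
--                     return False
--     return True
-- ===== SOURCE B (Python) =====
-- def NoRepeat(queue):
--     seen = {}
--     for row in queue:
--         tail = set(row[1:])
--         group = seen.setdefault(row[0], set())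
--         if group & tail:
--             return False
--         group |= tail
--     return True
-- ===== Notes on version B (the rewrite author's own statement) =====
-- stated objective: alternative
-- what changed: Replaced the all-pairs scan (for every pair of rows with equal first element, intersect their tails) by a single pass that groups rows by their first element in a dict and keeps one running set of seen tail elements per group, reporting a repeat on first membership hit.
-- outside the precondition, e.g. on NoRepeat([[]]): A returns True, B raises IndexError
import Mathlib
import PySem

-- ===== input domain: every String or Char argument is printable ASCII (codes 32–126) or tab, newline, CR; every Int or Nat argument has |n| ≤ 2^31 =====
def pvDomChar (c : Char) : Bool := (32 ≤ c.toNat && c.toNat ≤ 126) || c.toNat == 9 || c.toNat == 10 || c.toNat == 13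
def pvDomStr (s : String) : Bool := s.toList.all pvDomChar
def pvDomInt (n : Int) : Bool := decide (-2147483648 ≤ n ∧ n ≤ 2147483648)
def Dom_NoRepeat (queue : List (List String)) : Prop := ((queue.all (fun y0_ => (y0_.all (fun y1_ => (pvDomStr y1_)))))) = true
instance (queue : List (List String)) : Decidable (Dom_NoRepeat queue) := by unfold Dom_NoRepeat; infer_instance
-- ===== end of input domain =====

-- B replaces A's all-pairs tail-intersection scan by one pass with a per-first-element set of
-- seen tail elements. Equivalence is about the return value only.

-- ===== PORT A =====
-- literal transliteration of A: nested index loops over range(rowNum) with early 'return False'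
-- (the loops-with-return shape is the Bool 'all' of the negated condition).
def NoRepeat (queue : List (List String)) : Bool :=
  let rowNum : Int := queue.length
  (PySem.List.pyRange 0 rowNum 1).all (fun i =>
    (PySem.List.pyRange (i + 1) rowNum 1).all (fun j =>
      let qi := PySem.List.pyGetD queue i []
      let qj := PySem.List.pyGetD queue j []
      if PySem.List.pyGetD qi 0 "" == PySem.List.pyGetD qj 0 "" then
        let tempList1 := PySem.List.slice qi (some 1) none
        let tempList2 := PySem.List.slice qj (some 1) none
        -- 'if set(t1) & set(t2): return False' — empty intersection lets the loop continue
        PySem.Set.inter (PySem.Set.ofList tempList1) (PySem.Set.ofList tempList2) == ([] : List String)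
      else true))

-- ===== PORT B =====
-- literal transliteration of Source B: one pass over the rows carrying the dict 'seen'
def pvBGo (rows : List (List String)) (seen : PySem.Dict String (PySem.Set String)) : Bool :=
  match rows with
  | [] => true
  | row :: rest =>
    let tail : PySem.Set String := PySem.Set.ofList (PySem.List.slice row (some 1) none)
    let key := PySem.List.pyGetD row 0 ""
    let group := seen.getD key PySem.Set.empty
    if PySem.Set.inter group tail == ([] : List String) then
      pvBGo rest (seen.insert key (PySem.Set.union group tail))
    else false

def NoRepeat_alt (queue : List (List String)) : Bool :=
  pvBGo queue PySem.Dict.empty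

-- ===== PRECONDITION & SPEC =====
-- Pre_ excludes queues containing an empty row: Python evaluates row[0], which raises IndexError
-- there in general; on the few such inputs where A still returns (a single-element queue whose only
-- row is empty: no pair is ever compared) B raises instead, so they are excluded too (see cites).
def Pre_NoRepeat (queue : List (List String)) : Prop := ∀ r ∈ queue, r ≠ []
instance (queue : List (List String)) : Decidable (Pre_NoRepeat queue) := by unfold Pre_NoRepeat; infer_instance
def pvWitness_NoRepeat : List (List String) := [["a", "x", "y"], ["b", "x"], ["a", "z"]]

def Spec_NoRepeat (queue : List (List String)) (out : Bool) : Prop := out = NoRepeat_alt queue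
instance (queue : List (List String)) (out : Bool) : Decidable (Spec_NoRepeat queue out) := by unfold Spec_NoRepeat; infer_instance

-- ===== CLAIM (what is proved, stated in full; the proofs are below) =====
def Claim_equal_NoRepeat : Prop := ∀ (queue : List (List String)), Dom_NoRepeat queue → Pre_NoRepeat queue → Spec_NoRepeat queue (NoRepeat queue)

-- ===== LEMMAS AND PROOFS =====

-- the conflict relation both programs detect (proof-side characterisation)
def pvHit (a b : List String) : Prop :=
  PySem.List.pyGetD a 0 "" = PySem.List.pyGetD b 0 "" ∧
  ∃ x, x ∈ PySem.List.slice a (some 1) none ∧ x ∈ PySem.List.slice b (some 1) none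

theorem pvInterEmpty_iff (s t : PySem.Set String) :
    (PySem.Set.inter s t == ([] : List String)) = true ↔ ¬ ∃ x, x ∈ s ∧ x ∈ t := by
  rw [beq_iff_eq, List.eq_nil_iff_forall_not_mem]
  constructor
  · rintro h ⟨x, hs, ht⟩
    exact h x ((PySem.Set.mem_inter s t x).mpr ⟨hs, ht⟩)
  · intro h x hx
    exact h ⟨x, (PySem.Set.mem_inter s t x).mp hx⟩

theorem NoRepeat_eq_pairwise (queue : List (List String)) :
    NoRepeat queue = true ↔ queue.Pairwise (fun a b => ¬ pvHit a b) := by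
  unfold NoRepeat
  rw [List.pairwise_iff_getElem]
  simp only [List.all_eq_true, PySem.List.mem_pyRange_one]
  constructor
  · intro h i j hi hj hij
    have hA := h (i : Int) ⟨by omega, by omega⟩ (j : Int) ⟨by omega, by omega⟩
    rw [PySem.List.pyGetD_eq_getElem queue (i := (i : Int)) [] (by omega) (by exact_mod_cast hi),
        PySem.List.pyGetD_eq_getElem queue (i := (j : Int)) [] (by omega) (by exact_mod_cast hj)] at hA
    simp only [Int.toNat_natCast] at hA
    intro hhit
    obtain ⟨hhead, x, hx1, hx2⟩ := hhit
    rw [if_pos (by simpa using hhead), pvInterEmpty_iff] at hA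
    exact hA ⟨x, by simpa [PySem.Set.mem_ofList] using hx1, by simpa [PySem.Set.mem_ofList] using hx2⟩
  · intro h i hi j hj
    have h0i : 0 ≤ i := hi.1
    have hin : i < (queue.length : Int) := hi.2
    have hji : i + 1 ≤ j := hj.1
    have hjn : j < (queue.length : Int) := hj.2
    have hiN : i.toNat < queue.length := by omega
    have hjN : j.toNat < queue.length := by omega
    have hH := h i.toNat j.toNat hiN hjN (by omega)
    rw [PySem.List.pyGetD_eq_getElem queue (i := i) [] (by omega) (by exact_mod_cast hin),
        PySem.List.pyGetD_eq_getElem queue (i := j) [] (by omega) (by exact_mod_cast hjn)]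
    split_ifs with hhead
    · rw [pvInterEmpty_iff]
      rintro ⟨x, hx1, hx2⟩
      exact hH ⟨by simpa using hhead,
        x, by simpa [PySem.Set.mem_ofList] using hx1, by simpa [PySem.Set.mem_ofList] using hx2⟩
    · rfl

theorem pvBGo_eq_true_iff (rows : List (List String)) (seen : PySem.Dict String (PySem.Set String)) :
    pvBGo rows seen = true ↔
      rows.Pairwise (fun a b => ¬ pvHit a b) ∧
      ∀ r ∈ rows, ∀ x ∈ PySem.List.slice r (some 1) none,
        x ∉ seen.getD (PySem.List.pyGetD r 0 "") PySem.Set.empty := by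
  induction rows generalizing seen with
  | nil => simp [pvBGo]
  | cons row rest ih =>
    simp only [pvBGo]
    split_ifs with hcond
    · rw [ih]
      rw [pvInterEmpty_iff] at hcond
      constructor
      · rintro ⟨hpw, hrest⟩
        refine ⟨List.Pairwise.cons ?_ hpw, ?_⟩
        · rintro r hr ⟨hhead, x, hx1, hx2⟩
          have h2 := hrest r hr x hx2
          rw [PySem.Dict.getD_insert, if_pos hhead.symm] at h2
          exact h2 ((PySem.Set.mem_union _ _ x).mpr
            (Or.inr ((PySem.Set.mem_ofList _ x).mpr hx1)))
        · intro r hr x hx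
          rcases List.mem_cons.mp hr with hr | hr
          · subst hr
            intro hmem
            exact hcond ⟨x, hmem, (PySem.Set.mem_ofList _ x).mpr hx⟩
          · have h2 := hrest r hr x hx
            rw [PySem.Dict.getD_insert] at h2
            by_cases hk : PySem.List.pyGetD r 0 "" = PySem.List.pyGetD row 0 ""
            · rw [if_pos hk] at h2
              intro hmem
              exact h2 ((PySem.Set.mem_union _ _ x).mpr (Or.inl (hk ▸ hmem)))
            · rwa [if_neg hk] at h2
      · rintro ⟨hpw, hall⟩
        obtain ⟨hhead, hpw'⟩ := List.pairwise_cons.mp hpw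
        refine ⟨hpw', ?_⟩
        intro r hr x hx
        rw [PySem.Dict.getD_insert]
        by_cases hk : PySem.List.pyGetD r 0 "" = PySem.List.pyGetD row 0 ""
        · rw [if_pos hk]
          intro hmem
          rcases (PySem.Set.mem_union _ _ x).mp hmem with hg | ht
          · exact hall r (List.mem_cons_of_mem _ hr) x hx (hk ▸ hg)
          · exact hhead r hr ⟨hk.symm, x, (PySem.Set.mem_ofList _ x).mp ht, hx⟩
        · rw [if_neg hk]
          exact hall r (List.mem_cons_of_mem _ hr) x hx
    · rw [pvInterEmpty_iff] at hcond
      push Not at hcond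
      obtain ⟨x, hg, ht⟩ := hcond
      simp only [false_iff, not_and]
      intro _ hall
      exact hall row List.mem_cons_self x ((PySem.Set.mem_ofList _ x).mp ht) hg

theorem NoRepeat_alt_eq_pairwise (queue : List (List String)) :
    NoRepeat_alt queue = true ↔ queue.Pairwise (fun a b => ¬ pvHit a b) := by
  unfold NoRepeat_alt
  rw [pvBGo_eq_true_iff]
  simp [PySem.Dict.getD, PySem.Dict.empty, PySem.Dict.get?, PySem.Set.empty]

-- ===== VERDICT (by name: the statement is the Claim_ definition above) =====
theorem NoRepeat_spec : Claim_equal_NoRepeat := by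
  intro queue _ _
  unfold Spec_NoRepeat
  rw [Bool.eq_iff_iff, NoRepeat_eq_pairwise, NoRepeat_alt_eq_pairwise]
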